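-- pv_equiv track=rewrite | github.com/KlaraSaary/find-free-huts | find_neighboured_free_huts.py | reachable_huts
-- ===== SOURCE A (Python) =====
-- def reachable_huts(hut_tree, start_huts, steps):
--     reachable = set(start_huts)
--     frontier = set(start_huts)
--     for _ in range(steps):
--         next_frontier = set()
--         for hut in frontier:
--             next_frontier.update(hut_tree[hut]["neighbours"])
--         next_frontier -= reachable
--         reachable.update(next_frontier)
--         frontier = next_frontier
--     return reachable
-- ===== SOURCE B (Python) =====
-- from collections import deque
--
-- def reachable_huts(hut_tree, start_huts, steps):
--     dist = {}
--     queue = deque()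
--     for h in start_huts:
--         if h not in dist:
--             dist[h] = 0
--             queue.append(h)
--     while queue:
--         h = queue.popleft()
--         d = dist[h]
--         if d < steps:
--             for nb in hut_tree[h]["neighbours"]:
--                 if nb not in dist:
--                     dist[nb] = d + 1
--                     queue.append(nb)
--     return set(dist)
-- ===== Notes on version B (the rewrite author's own statement) =====
-- stated objective: alternative
-- what changed: Replaces A's level-by-level expansion (building a whole next-frontier set per round and subtracting the reachable set, looping exactly `steps` times even after the frontier empties) with a single FIFO queue BFS over a hut->distance dict that expands one hut at a time and stops as soon as the queue is empty.
import Mathlib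
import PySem

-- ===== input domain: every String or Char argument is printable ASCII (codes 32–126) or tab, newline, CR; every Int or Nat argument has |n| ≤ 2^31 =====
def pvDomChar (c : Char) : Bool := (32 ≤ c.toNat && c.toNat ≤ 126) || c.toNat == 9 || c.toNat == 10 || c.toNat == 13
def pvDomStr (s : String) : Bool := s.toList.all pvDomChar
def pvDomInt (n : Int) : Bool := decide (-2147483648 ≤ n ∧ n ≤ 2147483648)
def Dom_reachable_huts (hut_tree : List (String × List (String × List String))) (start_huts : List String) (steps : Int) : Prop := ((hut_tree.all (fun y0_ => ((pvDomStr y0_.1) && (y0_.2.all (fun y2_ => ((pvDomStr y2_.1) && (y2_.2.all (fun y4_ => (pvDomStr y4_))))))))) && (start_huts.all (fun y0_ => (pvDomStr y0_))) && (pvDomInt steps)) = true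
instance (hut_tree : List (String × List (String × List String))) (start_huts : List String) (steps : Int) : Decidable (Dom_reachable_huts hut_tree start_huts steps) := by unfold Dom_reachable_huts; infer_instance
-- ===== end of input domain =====

-- B replaces A's level-by-level frontier-set intersection loop with a single-queue BFS over a distance map (return value only; neither version mutates its arguments).

-- shared lookup helper: hut_tree[hut]["neighbours"]; returns [] where the Python raises KeyError (such inputs are excluded by Pre_)
def pvNbrs (ht : List (String × List (String × List String))) (h : String) : List String :=
  match (PySem.Dict.mk ht).get? h with
  | some v => PySem.Dict.getD (PySem.Dict.mk v) "neighbours" []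
  | none => []

-- ===== PORT A =====
-- 'for _ in range(steps)' as recursion on the (non-negative) trip count
def pvLoopA (ht : List (String × List (String × List String))) : Nat → PySem.Set String × PySem.Set String → PySem.Set String × PySem.Set String
  | 0, st => st
  | n + 1, st =>
      let nf0 : PySem.Set String := st.2.foldl (fun nf hut => PySem.Set.update nf (pvNbrs ht hut)) PySem.Set.empty
      let nf : PySem.Set String := PySem.Set.diff nf0 st.1
      pvLoopA ht n (PySem.Set.update st.1 nf, nf)

def reachable_huts (hut_tree : List (String × List (String × List String))) (start_huts : List String) (steps : Int) : List String :=
  (pvLoopA hut_tree steps.toNat (PySem.Set.ofList start_huts, PySem.Set.ofList start_huts)).1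

-- ===== PORT B =====
-- the 'while queue' loop; the fuel argument is only a totality guard (it never runs out under the bound used below)
def pvBFS (ht : List (String × List (String × List String))) (steps : Int) : Nat → List String → PySem.Dict String Int → PySem.Dict String Int
  | 0, _, dist => dist
  | _ + 1, [], dist => dist
  | fuel + 1, h :: q, dist =>
      let d := dist.getD h 0
      if d < steps then
        let st := (pvNbrs ht h).foldl
          (fun (st : List String × PySem.Dict String Int) nb =>
            if st.2.contains nb then st else (st.1 ++ [nb], st.2.insert nb (d + 1)))
          (q, dist)
        pvBFS ht steps fuel st.1 st.2
      else pvBFS ht steps fuel q dist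

def reachable_huts_alt (hut_tree : List (String × List (String × List String))) (start_huts : List String) (steps : Int) : List String :=
  let st := start_huts.foldl
    (fun (st : List String × PySem.Dict String Int) h =>
      if st.2.contains h then st else (st.1 ++ [h], st.2.insert h 0))
    ([], PySem.Dict.empty)
  let fuel := start_huts.length + hut_tree.foldl (fun n e => n + e.2.foldl (fun m p => m + p.2.length) 0) 0
  PySem.Set.ofList (pvBFS hut_tree steps fuel st.1 st.2).keys

-- ===== PRECONDITION & SPEC =====
-- Pre_ excludes inputs where A raises KeyError (a start hut or a reachable neighbour missing from hut_tree, or an entry lacking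
-- "neighbours"); as a closed-form approximation it also excludes some inputs A returns on, where every hut that is actually
-- reached within `steps` is well-formed but some unreached hut_tree entry is dangling (exact reachability is not closed-form).
def Pre_reachable_huts (hut_tree : List (String × List (String × List String))) (start_huts : List String) (steps : Int) : Prop :=
  steps ≤ 0 ∨ start_huts = [] ∨
    ((∀ h ∈ start_huts, (PySem.Dict.mk hut_tree).contains h = true) ∧
     ∀ e ∈ hut_tree, ((PySem.Dict.mk e.2).get? "neighbours").isSome = true ∧
       ∀ nb ∈ ((PySem.Dict.mk e.2).get? "neighbours").getD [], (PySem.Dict.mk hut_tree).contains nb = true)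
instance (hut_tree : List (String × List (String × List String))) (start_huts : List String) (steps : Int) : Decidable (Pre_reachable_huts hut_tree start_huts steps) := by unfold Pre_reachable_huts; infer_instance

def pvWitness_reachable_huts : (List (String × List (String × List String))) × List String × Int :=
  ([("a", [("neighbours", ["b"])]), ("b", [("neighbours", [])])], ["a"], 1)

def Spec_reachable_huts (hut_tree : List (String × List (String × List String))) (start_huts : List String) (steps : Int) (out : List String) : Prop := out = reachable_huts_alt hut_tree start_huts steps
instance (hut_tree : List (String × List (String × List String))) (start_huts : List String) (steps : Int) (out : List String) : Decidable (Spec_reachable_huts hut_tree start_huts steps out) := by unfold Spec_reachable_huts; infer_instance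

-- ===== CLAIM (what is proved, stated in full; the proofs are below) =====
def Claim_equal_reachable_huts : Prop := ∀ (hut_tree : List (String × List (String × List String))) (start_huts : List String) (steps : Int), Dom_reachable_huts hut_tree start_huts steps → Pre_reachable_huts hut_tree start_huts steps → Spec_reachable_huts hut_tree start_huts steps (reachable_huts hut_tree start_huts steps)

-- ===== LEMMAS AND PROOFS =====

-- filter-while-inserting: the new elements (first occurrences not in `seen`) a pass over xs appends
def pvNW : List String → List String → List String
  | [], _ => []
  | x :: xs, s => if x ∈ s then pvNW xs s else x :: pvNW xs (s ++ [x])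

theorem pvNW_congr (xs : List String) (s t : List String) (h : ∀ y, y ∈ s ↔ y ∈ t) :
    pvNW xs s = pvNW xs t := by
  induction xs generalizing s t with
  | nil => rfl
  | cons x xs ih =>
      simp only [pvNW]
      by_cases hx : x ∈ s
      · rw [if_pos hx, if_pos ((h x).1 hx)]; exact ih _ _ h
      · rw [if_neg hx, if_neg (fun c => hx ((h x).2 c))]
        refine congrArg _ (ih _ _ ?_)
        intro y; simp [h y]

theorem pvNW_append (xs ys : List String) (s : List String) :
    pvNW (xs ++ ys) s = pvNW xs s ++ pvNW ys (s ++ pvNW xs s) := by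
  induction xs generalizing s with
  | nil => simp [pvNW]
  | cons x xs ih =>
      simp only [pvNW, List.cons_append]
      by_cases hx : x ∈ s
      · simp only [if_pos hx]; exact ih s
      · simp only [if_neg hx, List.cons_append]
        rw [ih (s ++ [x])]
        simp [List.append_assoc]

theorem pvNW_mem {y : String} (xs s : List String) (hy : y ∈ pvNW xs s) : y ∈ xs ∧ y ∉ s := by
  induction xs generalizing s with
  | nil => simp [pvNW] at hy
  | cons x xs ih =>
      simp only [pvNW] at hy
      by_cases hx : x ∈ s
      · rw [if_pos hx] at hy
        rcases ih _ hy with ⟨h1, h2⟩; exact ⟨List.mem_cons_of_mem _ h1, h2⟩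
      · rw [if_neg hx] at hy
        rcases List.mem_cons.1 hy with rfl | hy'
        · exact ⟨List.mem_cons_self, hx⟩
        · rcases ih _ hy' with ⟨h1, h2⟩
          refine ⟨List.mem_cons_of_mem _ h1, fun c => h2 ?_⟩
          simp [c]

theorem pvNW_nodup (xs s : List String) : (pvNW xs s).Nodup := by
  induction xs generalizing s with
  | nil => simp [pvNW]
  | cons x xs ih =>
      simp only [pvNW]
      by_cases hx : x ∈ s
      · rw [if_pos hx]; exact ih s
      · rw [if_neg hx]
        refine List.nodup_cons.2 ⟨fun c => ?_, ih _⟩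
        have := (pvNW_mem _ _ c).2
        simp at this

theorem pvNW_length_le (xs s : List String) : (pvNW xs s).length ≤ xs.length := by
  induction xs generalizing s with
  | nil => simp [pvNW]
  | cons x xs ih =>
      simp only [pvNW]
      by_cases hx : x ∈ s
      · rw [if_pos hx]; exact (ih s).trans (by simp)
      · rw [if_neg hx]; simpa using ih (s ++ [x])

-- A's build-then-diff equals filter-while-inserting
theorem pv_diff_update (xs : List String) (a s : List String) :
    PySem.Set.diff (PySem.Set.update a xs) s = PySem.Set.diff a s ++ pvNW xs (s ++ a) := by
  induction xs generalizing a with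
  | nil => simp [PySem.Set.update, pvNW]
  | cons x xs ih =>
      have hstep : PySem.Set.update a (x :: xs) = PySem.Set.update (PySem.Set.add a x) xs := rfl
      rw [hstep]
      by_cases hx : x ∈ a
      · rw [PySem.Set.add_of_mem hx, ih a]
        have : pvNW (x :: xs) (s ++ a) = pvNW xs (s ++ a) := by
          simp [pvNW, List.mem_append, hx]
        rw [this]
      · rw [PySem.Set.add_of_not_mem hx, ih (a ++ [x])]
        by_cases hs : x ∈ s
        · have h1 : PySem.Set.diff (a ++ [x]) s = PySem.Set.diff a s := by
            simp [PySem.Set.diff, List.filter_append, hs]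
          have h2 : pvNW (x :: xs) (s ++ a) = pvNW xs (s ++ a) := by
            simp [pvNW, List.mem_append, hs]
          rw [h1, h2]
          refine congrArg _ (pvNW_congr _ _ _ ?_)
          intro y
          constructor
          · intro hy
            rcases List.mem_append.1 hy with h | h
            · exact List.mem_append.2 (Or.inl h)
            · rcases List.mem_append.1 h with h | h
              · exact List.mem_append.2 (Or.inr h)
              · simp at h; subst h; exact List.mem_append.2 (Or.inl hs)
          · intro hy
            rcases List.mem_append.1 hy with h | h
            · exact List.mem_append.2 (Or.inl h)
            · exact List.mem_append.2 (Or.inr (List.mem_append.2 (Or.inl h)))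
        · have h1 : PySem.Set.diff (a ++ [x]) s = PySem.Set.diff a s ++ [x] := by
            simp [PySem.Set.diff, List.filter_append, hs]
          have h2 : pvNW (x :: xs) (s ++ a) = x :: pvNW xs (s ++ a ++ [x]) := by
            simp [pvNW, List.mem_append, hs, hx]
          rw [h1, h2]
          simp [List.append_assoc]

theorem pv_diff_ofList (xs s : List String) :
    PySem.Set.diff (PySem.Set.ofList xs) s = pvNW xs s := by
  have h := pv_diff_update xs [] s
  simpa [PySem.Set.diff, PySem.Set.ofList_eq_foldl, PySem.Set.update] using h

theorem pv_ofList_eq_pvNW (xs : List String) : PySem.Set.ofList xs = pvNW xs [] := by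
  have h := pv_diff_ofList xs []
  have h2 : PySem.Set.diff (PySem.Set.ofList xs) [] = PySem.Set.ofList xs := by
    simp [PySem.Set.diff]
  rw [h2] at h
  exact h

-- the inner enqueue loop characterised
theorem pv_inner (v : Int)
    (ns : List String) (q : List String) (dist : PySem.Dict String Int) :
    ns.foldl (fun (st : List String × PySem.Dict String Int) nb =>
        if st.2.contains nb then st else (st.1 ++ [nb], st.2.insert nb v)) (q, dist)
      = (q ++ pvNW ns dist.keys,
         (pvNW ns dist.keys).foldl (fun dd x => dd.insert x v) dist) := by
  induction ns generalizing q dist with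
  | nil => simp [pvNW]
  | cons x ns ih =>
      by_cases hc : x ∈ dist.keys
      · have hcc : dist.contains x = true := (PySem.Dict.contains_iff_mem_keys _ _).2 hc
        have h1 : pvNW (x :: ns) dist.keys = pvNW ns dist.keys := by simp [pvNW, hc]
        simp only [List.foldl_cons, hcc, if_pos, h1]
        exact ih q dist
      · have hcc : dist.contains x = false := by
          by_contra hne
          exact hc ((PySem.Dict.contains_iff_mem_keys _ _).1 (by simpa using hne))
        have h1 : pvNW (x :: ns) dist.keys = x :: pvNW ns (dist.keys ++ [x]) := by
          simp [pvNW, hc]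
        have hkeys : (dist.insert x v).keys = dist.keys ++ [x] :=
          PySem.Dict.keys_insert_of_not_contains _ v hcc
        have hif : (if dist.contains x = true then (q, dist) else (q ++ [x], dist.insert x v))
            = (q ++ [x], dist.insert x v) := by simp [hcc]
        rw [List.foldl_cons, hif, ih (q ++ [x]) (dist.insert x v), hkeys, h1]
        simp [List.append_assoc]

theorem pv_getD_foldl_insert_not_mem (xs : List String) (d : PySem.Dict String Int) (v : Int)
    (y : String) (hy : y ∉ xs) :
    (xs.foldl (fun dd x => dd.insert x v) d).getD y 0 = d.getD y 0 := by
  induction xs generalizing d with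
  | nil => rfl
  | cons a xs ih =>
      have hya : y ≠ a := fun h => hy (by simp [h])
      have hyx : y ∉ xs := fun h => hy (by simp [h])
      rw [List.foldl_cons, ih _ hyx, PySem.Dict.getD_insert_of_ne _ v 0 hya]

theorem pv_keys_foldl_insert_fresh (xs : List String) (d : PySem.Dict String Int) (v : Int)
    (hnd : xs.Nodup) (hfresh : ∀ x ∈ xs, x ∉ d.keys) :
    (xs.foldl (fun dd x => dd.insert x v) d).keys = d.keys ++ xs := by
  induction xs generalizing d with
  | nil => simp
  | cons a xs ih =>
      have ha : a ∉ d.keys := hfresh a (by simp)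
      have hcc : d.contains a = false := by
        by_contra hne
        exact ha ((PySem.Dict.contains_iff_mem_keys _ _).1 (by simpa using hne))
      have hkeys : (d.insert a v).keys = d.keys ++ [a] :=
        PySem.Dict.keys_insert_of_not_contains _ v hcc
      rw [List.foldl_cons, ih _ (List.nodup_cons.1 hnd).2 ?_, hkeys]
      · simp
      · intro x hx
        rw [hkeys]
        intro hmem
        rcases List.mem_append.1 hmem with h | h
        · exact hfresh x (by simp [hx]) h
        · simp at h
          exact (List.nodup_cons.1 hnd).1 (h ▸ hx)

theorem pv_getD_foldl_insert_mem (xs : List String) (d : PySem.Dict String Int) (v : Int)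
    (x : String) (hnd : xs.Nodup) (hx : x ∈ xs) :
    (xs.foldl (fun dd x => dd.insert x v) d).getD x 0 = v := by
  induction xs generalizing d with
  | nil => simp at hx
  | cons a xs ih =>
      rw [List.foldl_cons]
      rcases List.mem_cons.1 hx with rfl | hx'
      · rw [pv_getD_foldl_insert_not_mem _ _ _ _ (List.nodup_cons.1 hnd).1]
        simp [PySem.Dict.getD_insert_self]
      · exact ih _ (List.nodup_cons.1 hnd).2 hx'

-- one whole level of B, as a function
def pvLevel (ht : List (String × List (String × List String))) (v : Int) : List String → PySem.Dict String Int → List String × PySem.Dict String Int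
  | [], dist => ([], dist)
  | h :: f, dist =>
      let ns := pvNW (pvNbrs ht h) dist.keys
      let r := pvLevel ht v f (ns.foldl (fun dd x => dd.insert x v) dist)
      (ns ++ r.1, r.2)

theorem pvLevel_out (ht : List (String × List (String × List String))) (v : Int)
    (f : List String) (dist : PySem.Dict String Int) :
    (pvLevel ht v f dist).1 = pvNW (f.flatMap (pvNbrs ht)) dist.keys := by
  induction f generalizing dist with
  | nil => simp [pvLevel, pvNW]
  | cons h f ih =>
      have hfresh : ∀ x ∈ pvNW (pvNbrs ht h) dist.keys, x ∉ dist.keys :=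
        fun x hx => (pvNW_mem _ _ hx).2
      have hkeys := pv_keys_foldl_insert_fresh (pvNW (pvNbrs ht h) dist.keys) dist v
        (pvNW_nodup _ _) hfresh
      simp only [pvLevel, List.flatMap_cons, pvNW_append]
      rw [ih, hkeys]

theorem pvLevel_keys (ht : List (String × List (String × List String))) (v : Int)
    (f : List String) (dist : PySem.Dict String Int) :
    (pvLevel ht v f dist).2.keys = dist.keys ++ (pvLevel ht v f dist).1 := by
  induction f generalizing dist with
  | nil => simp [pvLevel]
  | cons h f ih =>
      have hfresh : ∀ x ∈ pvNW (pvNbrs ht h) dist.keys, x ∉ dist.keys :=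
        fun x hx => (pvNW_mem _ _ hx).2
      have hkeys := pv_keys_foldl_insert_fresh (pvNW (pvNbrs ht h) dist.keys) dist v
        (pvNW_nodup _ _) hfresh
      simp only [pvLevel]
      rw [ih, hkeys]
      simp [List.append_assoc]

theorem pvLevel_getD_old (ht : List (String × List (String × List String))) (v : Int)
    (f : List String) (dist : PySem.Dict String Int) (y : String) (hy : y ∈ dist.keys) :
    (pvLevel ht v f dist).2.getD y 0 = dist.getD y 0 := by
  induction f generalizing dist with
  | nil => simp [pvLevel]
  | cons h f ih =>
      have hfresh : ∀ x ∈ pvNW (pvNbrs ht h) dist.keys, x ∉ dist.keys :=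
        fun x hx => (pvNW_mem _ _ hx).2
      have hkeys := pv_keys_foldl_insert_fresh (pvNW (pvNbrs ht h) dist.keys) dist v
        (pvNW_nodup _ _) hfresh
      have hy1 : y ∈ ((pvNW (pvNbrs ht h) dist.keys).foldl (fun dd x => dd.insert x v) dist).keys := by
        rw [hkeys]; exact List.mem_append.2 (Or.inl hy)
      have hy2 : y ∉ pvNW (pvNbrs ht h) dist.keys := fun c => hfresh y c hy
      simp only [pvLevel]
      rw [ih _ hy1, pv_getD_foldl_insert_not_mem _ _ _ _ hy2]

theorem pvLevel_getD_new (ht : List (String × List (String × List String))) (v : Int)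
    (f : List String) (dist : PySem.Dict String Int) (x : String) (hx : x ∈ (pvLevel ht v f dist).1) :
    (pvLevel ht v f dist).2.getD x 0 = v := by
  induction f generalizing dist with
  | nil => simp [pvLevel] at hx
  | cons h f ih =>
      have hfresh : ∀ y ∈ pvNW (pvNbrs ht h) dist.keys, y ∉ dist.keys :=
        fun y hy => (pvNW_mem _ _ hy).2
      have hkeys := pv_keys_foldl_insert_fresh (pvNW (pvNbrs ht h) dist.keys) dist v
        (pvNW_nodup _ _) hfresh
      simp only [pvLevel, List.mem_append] at hx ⊢
      rcases hx with hx | hx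
      · have h1 : x ∈ ((pvNW (pvNbrs ht h) dist.keys).foldl (fun dd x => dd.insert x v) dist).keys := by
          rw [hkeys]; exact List.mem_append.2 (Or.inr hx)
        rw [pvLevel_getD_old ht v f _ x h1]
        exact pv_getD_foldl_insert_mem _ _ _ _ (pvNW_nodup _ _) hx
      · exact ih _ hx

-- processing one level's queue segment
theorem pvBFS_cons_lt (ht : List (String × List (String × List String))) (steps : Int)
    (fuel : Nat) (h : String) (q : List String) (dist : PySem.Dict String Int)
    (hd : dist.getD h 0 < steps) :
    pvBFS ht steps (fuel + 1) (h :: q) dist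
      = pvBFS ht steps fuel (q ++ pvNW (pvNbrs ht h) dist.keys)
          ((pvNW (pvNbrs ht h) dist.keys).foldl (fun dd x => dd.insert x (dist.getD h 0 + 1)) dist) := by
  rw [show pvBFS ht steps (fuel + 1) (h :: q) dist =
    (if dist.getD h 0 < steps then
      pvBFS ht steps fuel
        ((pvNbrs ht h).foldl (fun (st : List String × PySem.Dict String Int) nb =>
          if st.2.contains nb then st else (st.1 ++ [nb], st.2.insert nb (dist.getD h 0 + 1))) (q, dist)).1
        ((pvNbrs ht h).foldl (fun (st : List String × PySem.Dict String Int) nb =>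
          if st.2.contains nb then st else (st.1 ++ [nb], st.2.insert nb (dist.getD h 0 + 1))) (q, dist)).2
     else pvBFS ht steps fuel q dist) from rfl]
  rw [if_pos hd, pv_inner]

theorem pvBFS_cons_ge (ht : List (String × List (String × List String))) (steps : Int)
    (fuel : Nat) (h : String) (q : List String) (dist : PySem.Dict String Int)
    (hd : ¬ (dist.getD h 0 < steps)) :
    pvBFS ht steps (fuel + 1) (h :: q) dist = pvBFS ht steps fuel q dist := by
  rw [show pvBFS ht steps (fuel + 1) (h :: q) dist =
    (if dist.getD h 0 < steps then
      pvBFS ht steps fuel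
        ((pvNbrs ht h).foldl (fun (st : List String × PySem.Dict String Int) nb =>
          if st.2.contains nb then st else (st.1 ++ [nb], st.2.insert nb (dist.getD h 0 + 1))) (q, dist)).1
        ((pvNbrs ht h).foldl (fun (st : List String × PySem.Dict String Int) nb =>
          if st.2.contains nb then st else (st.1 ++ [nb], st.2.insert nb (dist.getD h 0 + 1))) (q, dist)).2
     else pvBFS ht steps fuel q dist) from rfl]
  rw [if_neg hd]

theorem pv_level_run (ht : List (String × List (String × List String))) (steps : Int) (k : Int)
    (f g : List String) (dist : PySem.Dict String Int) (fuel : Nat)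
    (hv : ∀ h ∈ f, h ∈ dist.keys ∧ dist.getD h 0 = k) (hk : k < steps) :
    pvBFS ht steps (fuel + f.length) (f ++ g) dist
      = pvBFS ht steps fuel (g ++ (pvLevel ht (k + 1) f dist).1) (pvLevel ht (k + 1) f dist).2 := by
  induction f generalizing g dist with
  | nil => simp [pvLevel]
  | cons h f ih =>
      have hd : dist.getD h 0 = k := (hv h (by simp)).2
      have hlt : dist.getD h 0 < steps := by rw [hd]; exact hk
      have hstep := pvBFS_cons_lt ht steps (fuel + f.length) h (f ++ g) dist hlt
      have harith : fuel + (h :: f).length = (fuel + f.length) + 1 := by simp; omega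
      rw [harith, List.cons_append, hstep, hd]
      have hfresh : ∀ x ∈ pvNW (pvNbrs ht h) dist.keys, x ∉ dist.keys :=
        fun x hx => (pvNW_mem _ _ hx).2
      have hkeys := pv_keys_foldl_insert_fresh (pvNW (pvNbrs ht h) dist.keys) dist (k + 1)
        (pvNW_nodup _ _) hfresh
      have hv' : ∀ h' ∈ f,
          h' ∈ ((pvNW (pvNbrs ht h) dist.keys).foldl (fun dd x => dd.insert x (k + 1)) dist).keys ∧
          ((pvNW (pvNbrs ht h) dist.keys).foldl (fun dd x => dd.insert x (k + 1)) dist).getD h' 0 = k := by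
        intro h' hh'
        have hm := (hv h' (by simp [hh'])).1
        constructor
        · rw [hkeys]; exact List.mem_append.2 (Or.inl hm)
        · rw [pv_getD_foldl_insert_not_mem _ _ _ _ (fun c => hfresh h' c hm)]
          exact (hv h' (by simp [hh'])).2
      rw [List.append_assoc f g _]
      rw [ih (g ++ pvNW (pvNbrs ht h) dist.keys) _ hv']
      simp only [pvLevel]
      rw [List.append_assoc]

theorem pv_drain (ht : List (String × List (String × List String))) (steps : Int)
    (fuel : Nat) (q : List String) (dist : PySem.Dict String Int)
    (h : ∀ x ∈ q, ¬ (dist.getD x 0 < steps)) :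
    pvBFS ht steps fuel q dist = dist := by
  induction fuel generalizing q with
  | zero => rfl
  | succ fuel ih =>
      cases q with
      | nil => rfl
      | cons x q =>
          rw [pvBFS_cons_ge ht steps fuel x q dist (h x (by simp))]
          exact ih q (fun y hy => h y (by simp [hy]))

-- the universe of possible new keys, and the fuel potential
def pvU (ht : List (String × List (String × List String))) : List String :=
  PySem.Set.ofList (ht.flatMap (fun e => PySem.Dict.getD (PySem.Dict.mk e.2) "neighbours" []))

def pvMiss (ht : List (String × List (String × List String))) (dist : PySem.Dict String Int) : Nat :=
  ((pvU ht).filter (fun x => !(dist.contains x))).length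

theorem pv_get?_mk_mem {ν : Type} (l : List (String × ν)) (k : String) (v : ν)
    (h : (PySem.Dict.mk l).get? k = some v) : (k, v) ∈ l := by
  induction l with
  | nil => simp [show (PySem.Dict.mk ([] : List (String × ν))) = PySem.Dict.empty from rfl,
      PySem.Dict.get?_empty] at h
  | cons a l ih =>
      rcases a with ⟨a1, a2⟩
      rw [PySem.Dict.get?_mk_cons] at h
      by_cases he : a1 = k
      · rw [if_pos (by simp [he])] at h
        simp only [Option.some.injEq] at h
        subst he; subst h
        exact List.mem_cons_self
      · rw [if_neg (by simp [he])] at h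
        exact List.mem_cons_of_mem _ (ih h)

theorem pvNbrs_subset_U (ht : List (String × List (String × List String))) (h x : String)
    (hx : x ∈ pvNbrs ht h) : x ∈ pvU ht := by
  unfold pvNbrs at hx
  rcases hg : (PySem.Dict.mk ht).get? h with _ | v
  · rw [hg] at hx; simp at hx
  · rw [hg] at hx
    have hmem := pv_get?_mk_mem ht h v hg
    unfold pvU
    rw [PySem.Set.mem_ofList]
    exact List.mem_flatMap.2 ⟨(h, v), hmem, hx⟩

theorem pvMiss_level (ht : List (String × List (String × List String))) (v : Int)
    (f : List String) (dist : PySem.Dict String Int)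
    (hsub : ∀ x ∈ (pvLevel ht v f dist).1, x ∈ pvU ht) :
    pvMiss ht (pvLevel ht v f dist).2 + (pvLevel ht v f dist).1.length = pvMiss ht dist := by
  have hout := pvLevel_out ht v f dist
  have hnd : (pvLevel ht v f dist).1.Nodup := by rw [hout]; exact pvNW_nodup _ _
  have hfresh : ∀ x ∈ (pvLevel ht v f dist).1, x ∉ dist.keys := by
    rw [hout]; exact fun x hx => (pvNW_mem _ _ hx).2
  have hkeys := pvLevel_keys ht v f dist
  have hUnd : (pvU ht).Nodup := PySem.Set.nodup_ofList _
  set nf := (pvLevel ht v f dist).1 with hnf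
  have hpred : ∀ x : String, (!( (pvLevel ht v f dist).2.contains x))
      = ((!(decide (x ∈ nf))) && (!(dist.contains x))) := by
    intro x
    rw [PySem.Dict.contains_eq_decide_mem_keys, PySem.Dict.contains_eq_decide_mem_keys, hkeys]
    by_cases h1 : x ∈ dist.keys <;> by_cases h2 : x ∈ nf <;> simp [h1, h2]
  unfold pvMiss
  rw [List.filter_congr (fun x _ => hpred x), ← List.filter_filter]
  set l := (pvU ht).filter (fun x => !(dist.contains x)) with hl
  have hlnd : l.Nodup := hUnd.filter _
  have hnfl : ∀ x ∈ nf, x ∈ l := by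
    intro x hx
    rw [hl, List.mem_filter]
    refine ⟨hsub x hx, ?_⟩
    have := hfresh x hx
    simp [PySem.Dict.contains_eq_decide_mem_keys, this]
  have hperm : (l.filter (fun x => decide (x ∈ nf))).Perm nf := by
    rw [List.perm_ext_iff_of_nodup (hlnd.filter _) hnd]
    intro a
    rw [List.mem_filter]
    constructor
    · rintro ⟨_, h⟩; simpa using h
    · intro h; exact ⟨hnfl a h, by simpa using h⟩
  have hsplit : (l.filter (fun x => !(decide (x ∈ nf)))).length
      + (l.filter (fun x => decide (x ∈ nf))).length = l.length := by
    rw [Nat.add_comm]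
    exact (List.length_eq_length_filter_add (l := l) (fun x => decide (x ∈ nf))).symm
  rw [← hsplit, hperm.length_eq]

theorem pv_loopA_frontier_foldl (ht : List (String × List (String × List String)))
    (f : List String) (a : PySem.Set String) :
    f.foldl (fun nf hut => PySem.Set.update nf (pvNbrs ht hut)) a
      = PySem.Set.update a (f.flatMap (pvNbrs ht)) := by
  induction f generalizing a with
  | nil => simp [PySem.Set.update]
  | cons h f ih =>
      rw [List.foldl_cons, ih, List.flatMap_cons, PySem.Set.update_append]

-- main invariant: remaining rounds n; every queued hut sits at distance steps - n
theorem pv_main (ht : List (String × List (String × List String))) (steps : Int) (n : Nat)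
    (f : List String) (dist : PySem.Dict String Int) (fuel : Nat)
    (hv : ∀ h ∈ f, h ∈ dist.keys ∧ dist.getD h 0 = steps - n)
    (hfuel : f.length + pvMiss ht dist ≤ fuel) :
    (pvBFS ht steps fuel f dist).keys = (pvLoopA ht n (dist.keys, f)).1 := by
  induction n generalizing f dist fuel with
  | zero =>
      have hdrain : ∀ x ∈ f, ¬ ((dist.getD x 0) < steps) := by
        intro x hx
        have h2 := (hv x hx).2
        simp only [Nat.cast_zero, sub_zero] at h2
        rw [h2]
        exact lt_irrefl _
      rw [pv_drain ht steps fuel f dist hdrain]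
      simp [pvLoopA]
  | succ n ih =>
      have hfl : f.length ≤ fuel := le_trans (Nat.le_add_right _ _) hfuel
      have hfe : (fuel - f.length) + f.length = fuel := Nat.sub_add_cancel hfl
      have hrun := pv_level_run ht steps (steps - ((n : Int) + 1)) f [] dist (fuel - f.length)
        (by intro h hh; refine ⟨(hv h hh).1, ?_⟩; rw [(hv h hh).2]; push_cast; ring)
        (by omega)
      rw [List.append_nil] at hrun
      set L1 := (pvLevel ht (steps - ((n : Int) + 1) + 1) f dist).1 with hL1
      set L2 := (pvLevel ht (steps - ((n : Int) + 1) + 1) f dist).2 with hL2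
      have hsub : ∀ x ∈ L1, x ∈ pvU ht := by
        intro x hx
        rw [hL1, pvLevel_out] at hx
        rcases List.mem_flatMap.1 (pvNW_mem _ _ hx).1 with ⟨h, hh, hxh⟩
        exact pvNbrs_subset_U ht h x hxh
      have hmiss : pvMiss ht L2 + L1.length = pvMiss ht dist :=
        pvMiss_level ht (steps - ((n : Int) + 1) + 1) f dist hsub
      have hkeys : L2.keys = dist.keys ++ L1 := pvLevel_keys ht (steps - ((n : Int) + 1) + 1) f dist
      have hnd1 : L1.Nodup := by rw [hL1, pvLevel_out]; exact pvNW_nodup _ _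
      have hfr1 : ∀ x ∈ L1, x ∉ dist.keys := by
        rw [hL1, pvLevel_out]; exact fun x hx => (pvNW_mem _ _ hx).2
      have hvn : ∀ x ∈ L1, x ∈ L2.keys ∧ L2.getD x 0 = steps - (n : Int) := by
        intro x hx
        refine ⟨by rw [hkeys]; exact List.mem_append.2 (Or.inr hx), ?_⟩
        have h5 := pvLevel_getD_new ht (steps - ((n : Int) + 1) + 1) f dist x hx
        rw [hL2, h5]; ring
      have hfuel' : L1.length + pvMiss ht L2 ≤ fuel - f.length := by omega
      have hih := ih L1 L2 (fuel - f.length) (fun x hx => hvn x hx) hfuel'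
      conv_lhs => rw [← hfe, hrun]
      simp only [List.nil_append]
      rw [hih]
      have hnf : PySem.Set.diff
          (f.foldl (fun nf hut => PySem.Set.update nf (pvNbrs ht hut)) PySem.Set.empty) dist.keys = L1 := by
        rw [pv_loopA_frontier_foldl]
        rw [show (PySem.Set.empty : PySem.Set String) = ([] : List String) from rfl,
          PySem.Set.update_nil_left, pv_diff_ofList, hL1, pvLevel_out]
      have hupd : PySem.Set.update dist.keys L1 = L2.keys := by
        rw [PySem.Set.update_eq_append_of_disjoint _ _ hnd1 hfr1, hkeys]
      have hA : pvLoopA ht (n + 1) (dist.keys, f)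
          = pvLoopA ht n (PySem.Set.update dist.keys
              (PySem.Set.diff (f.foldl (fun nf hut => PySem.Set.update nf (pvNbrs ht hut)) PySem.Set.empty) dist.keys),
            PySem.Set.diff (f.foldl (fun nf hut => PySem.Set.update nf (pvNbrs ht hut)) PySem.Set.empty) dist.keys) := rfl
      rw [hA, hnf, hupd]

theorem pv_loopA_nodup (ht : List (String × List (String × List String))) (n : Nat)
    (r f : PySem.Set String) (h : r.Nodup) : (pvLoopA ht n (r, f)).1.Nodup := by
  induction n generalizing r f with
  | zero => exact h
  | succ n ih => exact ih _ _ (PySem.Set.nodup_update _ _ h)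

theorem pv_foldl_add_sum {α : Type} (g : α → Nat) (l : List α) (c : Nat) :
    l.foldl (fun m x => m + g x) c = c + (l.map g).sum := by
  induction l generalizing c with
  | nil => simp
  | cons a l ih => simp [ih]; omega

theorem pv_entry_le (l : List (String × List String)) :
    (PySem.Dict.getD (PySem.Dict.mk l) "neighbours" []).length
      ≤ l.foldl (fun m p => m + p.2.length) 0 := by
  rw [pv_foldl_add_sum (fun p => p.2.length) l 0, Nat.zero_add,
    PySem.Dict.getD_eq_get?_getD]
  rcases hg : (PySem.Dict.mk l).get? "neighbours" with _ | v
  · simp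
  · simp only [Option.getD_some]
    exact List.le_sum_of_mem (List.mem_map.2 ⟨_, pv_get?_mk_mem l _ v hg, rfl⟩)

theorem pv_flat_le_mass (ht : List (String × List (String × List String))) :
    (ht.flatMap (fun e => PySem.Dict.getD (PySem.Dict.mk e.2) "neighbours" [])).length
      ≤ ht.foldl (fun n e => n + e.2.foldl (fun m p => m + p.2.length) 0) 0 := by
  rw [List.length_flatMap, pv_foldl_add_sum (fun e => e.2.foldl (fun m p => m + p.2.length) 0) ht 0,
    Nat.zero_add]
  exact List.sum_le_sum (fun e _ => pv_entry_le e.2)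

-- ===== VERDICT (by name: the statement is the Claim_ definition above) =====
theorem reachable_huts_spec : Claim_equal_reachable_huts := by
  intro ht start steps _hdom _hpre
  show reachable_huts ht start steps = reachable_huts_alt ht start steps
  unfold reachable_huts reachable_huts_alt
  simp only []
  rw [pv_inner (0 : Int) start [] PySem.Dict.empty]
  have hke : (PySem.Dict.empty : PySem.Dict String Int).keys = [] := PySem.Dict.keys_empty
  rw [hke, List.nil_append]
  set f0 := pvNW start [] with hf0
  set dist0 : PySem.Dict String Int := f0.foldl (fun dd x => dd.insert x (0 : Int)) PySem.Dict.empty with hd0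
  have hk0 : dist0.keys = f0 := by
    rw [hd0, pv_keys_foldl_insert_fresh f0 PySem.Dict.empty (0 : Int) (by rw [hf0]; exact pvNW_nodup _ _)
      (by rw [hke]; simp), hke, List.nil_append]
  have hnd0 : f0.Nodup := by rw [hf0]; exact pvNW_nodup _ _
  have hofl : PySem.Set.ofList start = f0 := pv_ofList_eq_pvNW start
  have hgd0 : ∀ x ∈ f0, dist0.getD x 0 = 0 := by
    intro x hx
    rw [hd0]
    exact pv_getD_foldl_insert_mem f0 PySem.Dict.empty (0 : Int) x hnd0 hx
  by_cases hst : steps ≤ 0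
  · rw [Int.toNat_of_nonpos hst]
    rw [pv_drain ht steps _ f0 dist0 (by intro x hx; rw [hgd0 x hx]; omega)]
    rw [hk0, PySem.Set.ofList_eq_self_of_nodup _ hnd0]
    show (PySem.Set.ofList start, PySem.Set.ofList start).1 = f0
    rw [hofl]
  · have hmain := pv_main ht steps steps.toNat f0 dist0
      (start.length + ht.foldl (fun n e => n + e.2.foldl (fun m p => m + p.2.length) 0) 0)
      (by
        intro x hx
        refine ⟨by rw [hk0]; exact hx, ?_⟩
        rw [hgd0 x hx]
        omega)
      (by
        have h1 : f0.length ≤ start.length := by rw [hf0]; exact pvNW_length_le _ _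
        have h2 : pvMiss ht dist0 ≤ (pvU ht).length := List.length_filter_le _ _
        have h3 : (pvU ht).length
            ≤ (ht.flatMap (fun e => PySem.Dict.getD (PySem.Dict.mk e.2) "neighbours" [])).length :=
          PySem.Set.length_ofList_le _
        have h4 := pv_flat_le_mass ht
        omega)
    rw [hmain, hk0, hofl]
    exact (PySem.Set.ofList_eq_self_of_nodup _ (pv_loopA_nodup ht steps.toNat f0 f0 hnd0)).symm
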